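-- pv_equiv track=rewrite | github.com/pr0cf5/dtlb-timer | scripts/explore.py | seqs_to_graph
-- ===== SOURCE A (Python) =====
-- def seqs_to_graph(seqs):
--     adjacency_list = {}
--     for (seq, color) in seqs:
--         src = str(seq[:-1])
--         dst = str(seq[:])
--         if not src in adjacency_list:
--             adjacency_list[src] = [(dst, color)]
--         else:
--             adjacency_list[src].append((dst, color))
--     return adjacency_list
-- ===== SOURCE B (Python) =====
-- def seqs_to_graph(seqs):
--     pairs = [(str(seq[:-1]), (str(seq[:]), color)) for (seq, color) in seqs]
--     keys = list(dict.fromkeys(k for (k, _) in pairs))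
--     return {k: [v for (kk, v) in pairs if kk == k] for k in keys}
-- ===== Notes on version B (the rewrite author's own statement) =====
-- stated objective: alternative
-- what changed: B replaces A's one-pass dict insert/append loop with a comprehension pipeline: it materialises the (src,(dst,color)) pairs, dedups the source keys with dict.fromkeys, and builds each adjacency list by filtering the pair list per key.
import Mathlib
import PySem

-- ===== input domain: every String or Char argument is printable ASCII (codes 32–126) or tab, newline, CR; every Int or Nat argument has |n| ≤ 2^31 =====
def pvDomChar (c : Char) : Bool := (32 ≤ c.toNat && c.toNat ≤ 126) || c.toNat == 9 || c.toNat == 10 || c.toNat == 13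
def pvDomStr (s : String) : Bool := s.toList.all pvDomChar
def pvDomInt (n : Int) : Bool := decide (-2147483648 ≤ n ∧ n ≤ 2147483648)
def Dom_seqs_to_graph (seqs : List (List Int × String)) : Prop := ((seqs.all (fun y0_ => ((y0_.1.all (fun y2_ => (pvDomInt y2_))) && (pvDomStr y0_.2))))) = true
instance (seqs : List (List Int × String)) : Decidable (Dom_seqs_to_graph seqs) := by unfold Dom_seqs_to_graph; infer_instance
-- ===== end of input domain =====

-- B builds the same adjacency map by a list-comprehension pipeline (pairs, dedup'd keys,
-- per-key filter) instead of A's one-pass dict insert/append loop; objective: alternative.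

-- ===== PORT A =====
-- str(list_of_ints) ported by hand: "[" ++ ", ".join(str(x) for x in xs) ++ "]" — exact for ints,
-- whose Python repr is PySem.Int.toStr.
def pyListRepr (xs : List Int) : String := "[" ++ PySem.Str.join ", " (xs.map PySem.Int.toStr) ++ "]"

def seqs_to_graph (seqs : List (List Int × String)) : List (String × List (String × String)) :=
  (seqs.foldl (fun adjacency_list p =>
      let src := pyListRepr (PySem.List.slice p.1 none (some (-1)))
      let dst := pyListRepr (PySem.List.slice p.1 none none)
      if adjacency_list.contains src then
        adjacency_list.modify src [] (fun l => l ++ [(dst, p.2)])   -- adjacency_list[src].append(...)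
      else
        adjacency_list.insert src [(dst, p.2)]
    ) (PySem.Dict.empty : PySem.Dict String (List (String × String)))).items

-- ===== PORT B =====
def seqs_to_graph_alt (seqs : List (List Int × String)) : List (String × List (String × String)) :=
  let pairs := seqs.map (fun p =>
    (pyListRepr (PySem.List.slice p.1 none (some (-1))),
     (pyListRepr (PySem.List.slice p.1 none none), p.2)))
  let keys := PySem.List.dedup (pairs.map (·.1))
  keys.map (fun k => (k, (pairs.filter (fun q => q.1 == k)).map (·.2)))

-- ===== PRECONDITION & SPEC =====
def Spec_seqs_to_graph (seqs : List (List Int × String)) (out : List (String × List (String × String))) : Prop := out = seqs_to_graph_alt seqs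
instance (seqs : List (List Int × String)) (out : List (String × List (String × String))) : Decidable (Spec_seqs_to_graph seqs out) := by unfold Spec_seqs_to_graph; infer_instance

-- ===== CLAIM (what is proved, stated in full; the proofs are below) =====
def Claim_equal_seqs_to_graph : Prop := ∀ (seqs : List (List Int × String)), Dom_seqs_to_graph seqs → Spec_seqs_to_graph seqs (seqs_to_graph seqs)

-- ===== LEMMAS AND PROOFS =====

-- ===== VERDICT (by name: the statement is the Claim_ definition above) =====
-- A's loop body is exactly a dict.modify with default [] at the source key.
theorem stepA_eq_modify (d : PySem.Dict String (List (String × String)))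
    (k : String) (v : String × String) :
    (if d.contains k then d.modify k [] (fun l => l ++ [v]) else d.insert k [v])
      = d.modify k [] (fun l => l ++ [v]) := by
  split_ifs with h
  · rfl
  · have h' : d.contains k = false := by simpa using h
    simp [PySem.Dict.modify, PySem.Dict.getD_of_not_contains d ([] : List (String × String)) h']

theorem seqs_to_graph_spec : Claim_equal_seqs_to_graph := by
  intro seqs _
  unfold Spec_seqs_to_graph seqs_to_graph seqs_to_graph_alt
  set key := fun p : List Int × String => pyListRepr (PySem.List.slice p.1 none (some (-1))) with hkey
  set val := fun p : List Int × String => (pyListRepr (PySem.List.slice p.1 none none), p.2) with hval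
  have hfold :
      seqs.foldl (fun adjacency_list p =>
        let src := pyListRepr (PySem.List.slice p.1 none (some (-1)))
        let dst := pyListRepr (PySem.List.slice p.1 none none)
        if adjacency_list.contains src then
          adjacency_list.modify src [] (fun l => l ++ [(dst, p.2)])
        else
          adjacency_list.insert src [(dst, p.2)]) PySem.Dict.empty
      = seqs.foldl (fun d p => d.modify (key p) [] (fun l => l ++ [val p])) PySem.Dict.empty := by
    have hstep : (fun (adjacency_list : PySem.Dict String (List (String × String)))
        (p : List Int × String) =>
        let src := pyListRepr (PySem.List.slice p.1 none (some (-1)))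
        let dst := pyListRepr (PySem.List.slice p.1 none none)
        if adjacency_list.contains src then
          adjacency_list.modify src [] (fun l => l ++ [(dst, p.2)])
        else
          adjacency_list.insert src [(dst, p.2)])
        = (fun d p => d.modify (key p) [] (fun l => l ++ [val p])) := by
      funext d p
      exact stepA_eq_modify d (key p) (val p)
    rw [hstep]
  rw [hfold]
  -- pair list seen through the (key, val) decomposition
  have hpairs : seqs.map (fun p => (key p, val p))
      = seqs.map (fun p =>
          (pyListRepr (PySem.List.slice p.1 none (some (-1))),
           (pyListRepr (PySem.List.slice p.1 none none), p.2))) := rfl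
  rw [← hpairs]
  set d := seqs.foldl (fun d p => d.modify (key p) [] (fun l => l ++ [val p])) PySem.Dict.empty with hd
  have hnodup : d.keys.Nodup := by
    rw [hd]
    exact PySem.Dict.nodup_keys_foldl_modify_key seqs key [] (fun _ p l => l ++ [val p])
      PySem.Dict.empty PySem.Dict.nodup_keys_empty
  have hkeys : d.keys = PySem.List.dedup ((seqs.map (fun p => (key p, val p))).map (·.1)) := by
    rw [hd, PySem.Dict.keys_foldl_modify_key]
    simp [PySem.Dict.keys, PySem.Dict.empty, PySem.Set.update, PySem.List.dedup_eq_ofList,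
      PySem.Set.ofList, Function.comp_def]
  have hitems := PySem.Dict.items_eq_map_keys d hnodup ([] : List (String × String))
  rw [hitems, hkeys]
  apply List.map_congr_left
  intro k _
  refine congrArg (fun l => (k, l)) ?_
  have hget : d.getD k [] = ((seqs.map (fun p => (key p, val p))).filter (fun q => q.1 == k)).map (·.2) := by
    have hfoldpairs :
        seqs.foldl (fun d p => d.modify (key p) [] (fun l => l ++ [val p])) PySem.Dict.empty
        = (seqs.map (fun p => (key p, val p))).foldl
            (fun d q => d.modify q.1 [] (fun l => l ++ [q.2])) PySem.Dict.empty := by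
      rw [List.foldl_map]
    rw [hd, hfoldpairs, PySem.Dict.getD_foldl_modify_append]
    simp [PySem.Dict.getD_empty]
  exact hget
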